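-- pv_equiv track=rewrite | github.com/automatesecurity/masat | scanners/nmap_scanner.py | format_open_ports
-- ===== SOURCE A (Python) =====
-- def format_open_ports(open_ports):
--     """Format the open ports list into a human-readable table."""
--     if not open_ports:
--         return "No open ports found."
--
--     # Define header names.
--     headers = ["Port", "Service", "Version"]
--
--     # Calculate column widths.
--     width_port = max(len("Port"), *(len(entry.get("port", "")) for entry in open_ports))
--     width_service = max(len("Service"), *(len(entry.get("service", "")) for entry in open_ports))
--     width_version = max(len("Version"), *(len(entry.get("version", "")) for entry in open_ports))
--
--     # Build the header row.
--     header_row = f"{'Port'.ljust(width_port)}  {'Service'.ljust(width_service)}  {'Version'.ljust(width_version)}"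
--     separator = f"{'-'*width_port}  {'-'*width_service}  {'-'*width_version}"
--
--     # Build data rows.
--     rows = []
--     for entry in open_ports:
--         port = entry.get("port", "").ljust(width_port)
--         service = entry.get("service", "").ljust(width_service)
--         version = entry.get("version", "").ljust(width_version)
--         rows.append(f"{port}  {service}  {version}")
--
--     return "\n".join([header_row, separator] + rows)
-- ===== SOURCE B (Python) =====
-- def format_open_ports(open_ports):
--     """Format the open ports list into a human-readable table."""
--     if not open_ports:
--         return "No open ports found."
--
--     def column(title, key):
--         # One self-contained padded column block: title, dash rule, then cells.
--         cells = [title] + [e.get(key, "") for e in open_ports]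
--         w = max(map(len, cells))
--         cells.insert(1, "-" * w)
--         return [c.ljust(w) for c in cells]
--
--     cols = [column("Port", "port"), column("Service", "service"),
--             column("Version", "version")]
--     # Stitch the three vertical blocks together line by line.
--     return "\n".join("  ".join(line) for line in zip(*cols))
-- ===== Notes on version B (the rewrite author's own statement) =====
-- stated objective: alternative
-- what changed: B is column-major: each of the three columns is rendered as a self-contained padded vertical block (title, dash rule derived from that column's own max width, then its padded cells) by one helper, and the final table is produced by transposing the three blocks with zip and joining each resulting line; A instead precomputes three shared widths and builds the table row by row with bespoke f-strings plus an append loop.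
import Mathlib
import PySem

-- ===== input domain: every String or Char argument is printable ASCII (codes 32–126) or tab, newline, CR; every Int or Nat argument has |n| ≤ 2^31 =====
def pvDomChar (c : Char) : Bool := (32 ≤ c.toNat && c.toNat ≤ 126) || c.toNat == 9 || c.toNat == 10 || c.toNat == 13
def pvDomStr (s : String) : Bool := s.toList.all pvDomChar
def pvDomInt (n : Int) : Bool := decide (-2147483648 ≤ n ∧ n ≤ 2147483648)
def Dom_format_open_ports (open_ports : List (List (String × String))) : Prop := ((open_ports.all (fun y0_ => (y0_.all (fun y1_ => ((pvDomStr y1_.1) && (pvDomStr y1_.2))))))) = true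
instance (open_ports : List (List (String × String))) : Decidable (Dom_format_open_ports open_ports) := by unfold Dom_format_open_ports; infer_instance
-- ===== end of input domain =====

-- B renders each of the three columns as a self-contained padded vertical block
-- (title, dash rule, cells) and then stitches the blocks together line by line
-- with zip, instead of A's row-major build over precomputed widths; objective: simpler.

-- shared helper: entry.get(k, "") — first-match lookup in the association list
def pyGetD (e : List (String × String)) (k d : String) : String :=
  match e.find? (fun p => p.1 == k) with
  | some p => p.2
  | none => d

-- s.ljust(w) on code points: pad with spaces on the right (exact)
def pvLjust (cs : List Char) (w : Nat) : List Char :=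
  cs ++ List.replicate (w - cs.length) ' '

-- ===== PORT A =====
-- max(a, *gen) = fold of max over the generated values starting from a
def pyMaxFrom (a : Nat) (xs : List Nat) : Nat := xs.foldl Nat.max a

def format_open_ports (open_ports : List (List (String × String))) : String :=
  if open_ports.isEmpty then "No open ports found." else
  let width_port := pyMaxFrom ("Port".toList.length)
      (open_ports.map (fun e => (pyGetD e "port" "").toList.length))
  let width_service := pyMaxFrom ("Service".toList.length)
      (open_ports.map (fun e => (pyGetD e "service" "").toList.length))
  let width_version := pyMaxFrom ("Version".toList.length)
      (open_ports.map (fun e => (pyGetD e "version" "").toList.length))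
  let header_row := pvLjust "Port".toList width_port ++ "  ".toList ++
      pvLjust "Service".toList width_service ++ "  ".toList ++
      pvLjust "Version".toList width_version
  let separator := List.replicate width_port '-' ++ "  ".toList ++
      List.replicate width_service '-' ++ "  ".toList ++
      List.replicate width_version '-'
  -- the rows-building loop: append one formatted row per entry
  let rows := open_ports.foldl (fun acc e =>
      acc ++ [pvLjust (pyGetD e "port" "").toList width_port ++ "  ".toList ++
              pvLjust (pyGetD e "service" "").toList width_service ++ "  ".toList ++
              pvLjust (pyGetD e "version" "").toList width_version]) []
  String.ofList (PySem.Chars.join "\n".toList ([header_row, separator] ++ rows))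

-- ===== PORT B =====
-- max(map(len, cells)) on a nonempty list = fold of max from 0
def pvMaxLen (col : List (List Char)) : Nat := (col.map List.length).foldl Nat.max 0

-- one padded column block: title, dash rule, then the padded cells
def pvColumn (open_ports : List (List (String × String))) (title key : String) : List (List Char) :=
  let cells := title.toList :: open_ports.map (fun e => (pyGetD e key "").toList)
  let w := pvMaxLen cells
  let cells := PySem.List.insert cells 1 (List.replicate w '-')
  cells.map (fun c => pvLjust c w)

def format_open_ports_alt (open_ports : List (List (String × String))) : String :=
  if open_ports.isEmpty then "No open ports found." else
  let c1 := pvColumn open_ports "Port" "port"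
  let c2 := pvColumn open_ports "Service" "service"
  let c3 := pvColumn open_ports "Version" "version"
  -- zip(*cols) and join each line with two spaces
  let lines := List.zipWith3
      (fun a b c => PySem.Chars.join "  ".toList [a, b, c]) c1 c2 c3
  String.ofList (PySem.Chars.join "\n".toList lines)

-- ===== PRECONDITION & SPEC =====
def Spec_format_open_ports (open_ports : List (List (String × String))) (out : String) : Prop := out = format_open_ports_alt open_ports
instance (open_ports : List (List (String × String))) (out : String) : Decidable (Spec_format_open_ports open_ports out) := by unfold Spec_format_open_ports; infer_instance

-- ===== CLAIM (what is proved, stated in full; the proofs are below) =====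
def Claim_equal_format_open_ports : Prop := ∀ (open_ports : List (List (String × String))), Dom_format_open_ports open_ports → Spec_format_open_ports open_ports (format_open_ports open_ports)

-- ===== LEMMAS AND PROOFS =====
theorem foldl_snoc_eq_map {α β : Type} (f : α → β) (l : List α) (acc : List β) :
    l.foldl (fun acc e => acc ++ [f e]) acc = acc ++ l.map f := by
  induction l generalizing acc with
  | nil => simp
  | cons x xs ih => simp [List.foldl, ih]

theorem pvMaxLen_cons (c : List Char) (col : List (List Char)) :
    pvMaxLen (c :: col) = pyMaxFrom c.length (col.map List.length) := by
  simp [pvMaxLen, pyMaxFrom]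

theorem pvLjust_replicate_dash (w : Nat) :
    pvLjust (List.replicate w '-') w = List.replicate w '-' := by
  simp [pvLjust]

-- the column block laid out explicitly
theorem pvColumn_eq (open_ports : List (List (String × String))) (title key : String) :
    pvColumn open_ports title key =
      (let w := pyMaxFrom title.toList.length
          (open_ports.map (fun e => (pyGetD e key "").toList.length))
       pvLjust title.toList w :: List.replicate w '-' ::
         open_ports.map (fun e => pvLjust (pyGetD e key "").toList w)) := by
  unfold pvColumn
  dsimp only
  rw [PySem.List.insert_ofNat _ _ _ (by simp)]
  simp [pvMaxLen_cons, pvLjust_replicate_dash, List.map_map, Function.comp_def]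

theorem zipWith3_map_same {α β : Type} (f : β → β → β → β) (g1 g2 g3 : α → β) (l : List α) :
    List.zipWith3 f (l.map g1) (l.map g2) (l.map g3) =
      l.map (fun x => f (g1 x) (g2 x) (g3 x)) := by
  induction l with
  | nil => rfl
  | cons x xs ih => simp [List.zipWith3, ih]

theorem join_three (sep a b c : List Char) :
    PySem.Chars.join sep [a, b, c] = a ++ sep ++ b ++ sep ++ c := by
  simp [PySem.Chars.join_cons_cons, PySem.Chars.join_singleton, List.append_assoc]

-- ===== VERDICT (by name: the statement is the Claim_ definition above) =====
theorem format_open_ports_spec : Claim_equal_format_open_ports := by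
  intro open_ports _
  unfold Spec_format_open_ports format_open_ports format_open_ports_alt
  cases open_ports with
  | nil => rfl
  | cons x xs =>
    simp only [pvColumn_eq, List.zipWith3, zipWith3_map_same, join_three,
      foldl_snoc_eq_map, List.nil_append, List.map_cons]
    rfl
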